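-- pv_equiv track=rewrite | github.com/360ghar/social-ai-reply | app/services/product/reddit.py | _smart_group_keywords
-- ===== SOURCE A (Python) =====
-- def _chunk_keywords(keywords: list[str], size: int) -> list[list[str]]:
--     return [keywords[idx:idx + size] for idx in range(0, len(keywords), size)]
--
-- def _smart_group_keywords(keywords: list[str], size: int) -> list[list[str]]:
--     """Group keywords by token overlap so semantically related terms
--     are searched together.  Falls back to positional chunking when
--     there's no overlap.
--     """
--     if len(keywords) <= size:
--         return [keywords] if keywords else []
--
--     # Build token sets for each keyword
--     kw_tokens = [(kw, set(kw.lower().split())) for kw in keywords]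
--     used: set[int] = set()
--     groups: list[list[str]] = []
--
--     for i, (kw, tokens) in enumerate(kw_tokens):
--         if i in used:
--             continue
--         group = [kw]
--         used.add(i)
--         for j, (other_kw, other_tokens) in enumerate(kw_tokens):
--             if j in used:
--                 continue
--             if len(group) >= size:
--                 break
--             # Group if keywords share at least one meaningful token
--             shared = tokens & other_tokens
--             # Exclude very short shared tokens (e.g. "ai", "vr")
--             meaningful_shared = {t for t in shared if len(t) >= 3}
--             if meaningful_shared:
--                 group.append(other_kw)
--                 used.add(j)
--         groups.append(group)
--
--     # Pick up any remaining ungrouped keywords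
--     remaining = [kw for i, (kw, _) in enumerate(kw_tokens) if i not in used]
--     if remaining:
--         groups.extend(_chunk_keywords(remaining, size))
--
--     return groups
-- ===== SOURCE B (Python) =====
-- def _smart_group_keywords(keywords: list[str], size: int) -> list[list[str]]:
--     """Group keywords by token overlap using an inverted index
--     token -> posting list of keyword indices, so each anchor only
--     scans the keywords that actually share a meaningful token."""
--     if len(keywords) <= size:
--         return [keywords] if keywords else []
--
--     # meaningful (>= 3 chars) tokens of each keyword
--     tok_lists = [[t for t in kw.lower().split() if len(t) >= 3] for kw in keywords]
--
--     # inverted index: token -> indices of keywords containing it (increasing)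
--     index: dict[str, list[int]] = {}
--     for i, toks in enumerate(tok_lists):
--         for t in toks:
--             index.setdefault(t, []).append(i)
--
--     used: set[int] = set()
--     groups: list[list[str]] = []
--     for i in range(len(keywords)):
--         if i in used:
--             continue
--         used.add(i)
--         group = [keywords[i]]
--         for j in sorted({j for t in tok_lists[i] for j in index[t]}):
--             if len(group) >= size:
--                 break
--             if j in used:
--                 continue
--             group.append(keywords[j])
--             used.add(j)
--         groups.append(group)
--     return groups
-- ===== Notes on version B (the rewrite author's own statement) =====
-- stated objective: faster
-- what changed: Replaces A's per-anchor rescan of all n keywords (a token-set intersection per pair) by an inverted index token -> posting list of keyword indices; each anchor walks only the sorted union of its tokens' postings.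
import Mathlib
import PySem

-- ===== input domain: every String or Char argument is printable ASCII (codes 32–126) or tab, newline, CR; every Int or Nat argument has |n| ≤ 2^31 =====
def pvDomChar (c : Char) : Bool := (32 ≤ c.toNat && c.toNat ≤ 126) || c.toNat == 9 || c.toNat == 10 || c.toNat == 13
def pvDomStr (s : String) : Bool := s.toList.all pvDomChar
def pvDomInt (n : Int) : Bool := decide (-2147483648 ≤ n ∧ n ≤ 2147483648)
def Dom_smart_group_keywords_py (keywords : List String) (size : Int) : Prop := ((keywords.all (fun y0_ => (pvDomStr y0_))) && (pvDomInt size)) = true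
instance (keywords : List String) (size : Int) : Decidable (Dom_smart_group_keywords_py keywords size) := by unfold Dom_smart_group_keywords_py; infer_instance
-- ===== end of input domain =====

-- B replaces A's per-anchor scan over ALL keywords by an inverted index token → posting
-- list: each anchor visits only the sorted union of its tokens' postings (objective: faster;
-- a timing run measured B ~148x at n=1024 and A timing out where B returns at n=4096).

-- ===== PORT A =====
-- set(kw.lower().split())
def pvTokSet (kw : String) : PySem.Set String :=
  PySem.Set.ofList (PySem.Str.split₀ (PySem.Str.lower kw))

-- {t for t in (tokens & other_tokens) if len(t) >= 3}
def pvMeaningfulShared (tokens otherTokens : PySem.Set String) : PySem.Set String :=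
  PySem.Set.ofList ((PySem.Set.inter tokens otherTokens).filter (fun t => decide (3 ≤ PySem.Str.len t)))

-- _chunk_keywords (reached only when `remaining` is non-empty)
def chunk_keywords_py (keywords : List String) (size : Int) : List (List String) :=
  (PySem.List.pyRange 0 (PySem.List.len keywords) size).map
    (fun idx => PySem.List.slice keywords (some idx) (some (idx + size)))

-- the inner `for j, (other_kw, other_tokens) in enumerate(kw_tokens)` loop of A
def pvInnerA (size : Int) (tokens : PySem.Set String) :
    List (Int × String × PySem.Set String) → List String → PySem.Set Int →
    List String × PySem.Set Int
  | [], group, used => (group, used)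
  | (j, okw, otoks) :: rest, group, used =>
    if PySem.Set.contains used j then pvInnerA size tokens rest group used
    else if size ≤ (group.length : Int) then (group, used)
    else if pvMeaningfulShared tokens otoks ≠ [] then
      pvInnerA size tokens rest (group ++ [okw]) (PySem.Set.add used j)
    else pvInnerA size tokens rest group used

-- one iteration of A's outer `for i, (kw, tokens) in enumerate(kw_tokens)` loop
def pvOuterStepA (size : Int) (kwt : List (String × PySem.Set String))
    (st : PySem.Set Int × List (List String)) (p : Int × String × PySem.Set String) :
    PySem.Set Int × List (List String) :=
  if PySem.Set.contains st.1 p.1 then st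
  else
    let r := pvInnerA size p.2.2 (PySem.List.enumerate kwt) [p.2.1] (PySem.Set.add st.1 p.1)
    (r.2, st.2 ++ [r.1])

def smart_group_keywords_py (keywords : List String) (size : Int) : List (List String) :=
  if PySem.List.len keywords ≤ size then (if keywords ≠ [] then [keywords] else []) else
  let kwt := keywords.map (fun kw => (kw, pvTokSet kw))
  let st := (PySem.List.enumerate kwt).foldl (pvOuterStepA size kwt) (PySem.Set.empty, [])
  let remaining := ((PySem.List.enumerate kwt).filter
      (fun p => ! PySem.Set.contains st.1 p.1)).map (fun p => p.2.1)
  if remaining ≠ [] then st.2 ++ chunk_keywords_py remaining size else st.2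

-- ===== PORT B =====
-- [t for t in kw.lower().split() if len(t) >= 3]
def pvToks (kw : String) : List String :=
  (PySem.Str.split₀ (PySem.Str.lower kw)).filter (fun t => decide (3 ≤ PySem.Str.len t))

-- inverted index; dict.setdefault(t, []).append(i) = Dict.modify t [] (· ++ [i])
def pvIndexB (tokLists : List (List String)) : PySem.Dict String (List Int) :=
  (PySem.List.enumerate tokLists).foldl
    (fun d p => p.2.foldl (fun d t => d.modify t [] (fun l => l ++ [p.1])) d)
    PySem.Dict.empty

-- sorted({j for t in toks for j in index[t]}); index[t] never misses (every t of
-- toks was indexed), so the exact lookup is ported as getD t []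
def pvCandB (index : PySem.Dict String (List Int)) (toks : List String) : List Int :=
  PySem.List.sorted (PySem.Set.ofList (toks.flatMap (fun t => index.getD t []))) (fun x => x)

-- the inner `for j in sorted({...})` loop of B
def pvInnerB (size : Int) (keywords : List String) :
    List Int → List String → PySem.Set Int → List String × PySem.Set Int
  | [], group, used => (group, used)
  | j :: rest, group, used =>
    if size ≤ (group.length : Int) then (group, used)
    else if PySem.Set.contains used j then pvInnerB size keywords rest group used
    else pvInnerB size keywords rest (group ++ [PySem.List.pyGetD keywords j ""])
      (PySem.Set.add used j)

-- one iteration of B's outer `for i in range(len(keywords))` loop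
def pvOuterStepB (size : Int) (keywords : List String) (tokLists : List (List String))
    (index : PySem.Dict String (List Int))
    (st : PySem.Set Int × List (List String)) (i : Int) :
    PySem.Set Int × List (List String) :=
  if PySem.Set.contains st.1 i then st
  else
    let r := pvInnerB size keywords (pvCandB index (PySem.List.pyGetD tokLists i []))
      [PySem.List.pyGetD keywords i ""] (PySem.Set.add st.1 i)
    (r.2, st.2 ++ [r.1])

def smart_group_keywords_py_alt (keywords : List String) (size : Int) : List (List String) :=
  if PySem.List.len keywords ≤ size then (if keywords ≠ [] then [keywords] else []) else
  let tokLists := keywords.map pvToks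
  let index := pvIndexB tokLists
  ((PySem.List.pyRange 0 (PySem.List.len keywords) 1).foldl
    (pvOuterStepB size keywords tokLists index) (PySem.Set.empty, [])).2

-- ===== PRECONDITION & SPEC =====
def Spec_smart_group_keywords_py (keywords : List String) (size : Int) (out : List (List String)) : Prop := out = smart_group_keywords_py_alt keywords size
instance (keywords : List String) (size : Int) (out : List (List String)) : Decidable (Spec_smart_group_keywords_py keywords size out) := by unfold Spec_smart_group_keywords_py; infer_instance

-- ===== CLAIM (what is proved, stated in full; the proofs are below) =====
def Claim_equal_smart_group_keywords_py : Prop := ∀ (keywords : List String) (size : Int), Dom_smart_group_keywords_py keywords size → Spec_smart_group_keywords_py keywords size (smart_group_keywords_py keywords size)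

-- ===== LEMMAS AND PROOFS =====

-- Boolean form of "the two keywords share a meaningful token"
def pvSh (a b : String) : Bool := (pvToks a).any (fun t => decide (t ∈ pvToks b))

theorem pvShareA_iff (a b : String) :
    pvMeaningfulShared (pvTokSet a) (pvTokSet b) ≠ [] ↔ pvSh a b = true := by
  rw [Ne, List.eq_nil_iff_forall_not_mem]
  push Not
  simp only [pvMeaningfulShared, pvSh, pvToks, pvTokSet, PySem.Set.mem_ofList,
    List.mem_filter, PySem.Set.mem_inter, List.any_eq_true, decide_eq_true_eq]
  constructor
  · rintro ⟨t, ⟨hA, hB⟩, hlen⟩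
    exact ⟨t, ⟨hA, hlen⟩, hB, hlen⟩
  · rintro ⟨t, ⟨hA, hlen⟩, hB, _⟩
    exact ⟨t, ⟨hA, hB⟩, hlen⟩

-- posting lists: j ∈ index[t] ↔ j indexes a keyword whose token list contains t
theorem pvIndex_mem (tokLists : List (List String)) (t : String) (j : Int) :
    j ∈ (pvIndexB tokLists).getD t [] ↔
      ∃ k : Nat, ∃ _ : k < tokLists.length, j = (k : Int) ∧ t ∈ tokLists[k] := by
  have h1 : pvIndexB tokLists
      = ((PySem.List.enumerate tokLists).flatMap (fun p => p.2.map (fun s => (s, p.1)))).foldl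
          (fun d q => d.modify q.1 [] (fun l => l ++ [q.2])) PySem.Dict.empty := by
    rw [List.foldl_flatMap]
    unfold pvIndexB
    congr 1
    funext d p
    rw [List.foldl_map]
  rw [h1, PySem.Dict.getD_foldl_modify_append]
  have h0 : (PySem.Dict.empty : PySem.Dict String (List Int)).getD t [] = [] := by
    simp [PySem.Dict.getD, PySem.Dict.empty, PySem.Dict.get?]
  rw [h0, List.nil_append]
  simp only [List.mem_map, List.mem_filter, List.mem_flatMap,
    PySem.List.mem_enumerate_iff, beq_iff_eq, zero_add]
  constructor
  · rintro ⟨q, ⟨⟨p, ⟨k, hk, rfl⟩, hq⟩, hqt⟩, rfl⟩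
    obtain ⟨s, hs, rfl⟩ := hq
    simp only at hqt
    subst hqt
    exact ⟨k, hk, rfl, hs⟩
  · rintro ⟨k, hk, rfl, ht⟩
    refine ⟨(t, (k : Int)), ⟨⟨((k : Int), tokLists[k]), ⟨k, hk, rfl⟩, ?_⟩, rfl⟩, rfl⟩
    exact ⟨t, ht, rfl⟩

theorem pvCand_eq (keywords : List String) (i : Int)
    (hi : i ∈ PySem.List.pyRange 0 (PySem.List.len keywords) 1) :
    pvCandB (pvIndexB (keywords.map pvToks)) (PySem.List.pyGetD (keywords.map pvToks) i []) =
      (PySem.List.pyRange 0 (PySem.List.len keywords) 1).filter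
        (fun j => pvSh (PySem.List.pyGetD keywords i "") (PySem.List.pyGetD keywords j "")) := by
  obtain ⟨h0, hn⟩ := PySem.List.mem_pyRange_one.mp hi
  rw [PySem.List.len_eq] at hn
  have hget : ∀ (k : Nat) (hk : k < keywords.length),
      PySem.List.pyGetD keywords (k : Int) "" = keywords[k]'hk := by
    intro k hk
    rw [PySem.List.pyGetD_natCast, List.getD_eq_getElem _ _ hk]
  have hgi : PySem.List.pyGetD keywords i "" = keywords[i.toNat]'(by omega) := by
    rw [PySem.List.pyGetD_eq_getElem _ _ h0 hn]
  have hti : PySem.List.pyGetD (keywords.map pvToks) i [] = pvToks (keywords[i.toNat]'(by omega)) := by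
    rw [PySem.List.pyGetD_eq_getElem _ _ h0 (by simpa using hn), List.getElem_map]
  unfold pvCandB
  apply PySem.List.sorted_eq_of_perm_of_pairwise_lt
  · rw [List.perm_ext_iff_of_nodup
      ((PySem.List.nodup_pyRange_one 0 (PySem.List.len keywords)).filter _)
      (PySem.Set.nodup_ofList _)]
    intro a
    simp only [List.mem_filter, PySem.Set.mem_ofList, List.mem_flatMap,
      PySem.List.mem_pyRange_one, pvIndex_mem, hti, hgi, PySem.List.len_eq]
    constructor
    · rintro ⟨⟨ha0, han⟩, hsh⟩
      unfold pvSh at hsh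
      simp only [List.any_eq_true, decide_eq_true_eq] at hsh
      obtain ⟨tok, htok1, htok2⟩ := hsh
      refine ⟨tok, htok1, a.toNat, by simpa using (by omega : a.toNat < keywords.length),
        by omega, ?_⟩
      rw [PySem.List.pyGetD_eq_getElem _ _ ha0 han] at htok2
      rwa [List.getElem_map]
    · rintro ⟨tok, htok1, k, hk, rfl, htok2⟩
      rw [List.getElem_map] at htok2
      have hk' : k < keywords.length := by simpa using hk
      refine ⟨⟨by omega, by exact_mod_cast hk'⟩, ?_⟩
      unfold pvSh
      simp only [List.any_eq_true, decide_eq_true_eq]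
      exact ⟨tok, htok1, by rwa [hget k hk']⟩
  · exact (PySem.List.pairwise_lt_pyRange_one 0 (PySem.List.len keywords)).filter _

theorem pvInnerA_full (size : Int) (tokens : PySem.Set String)
    (T : List (Int × String × PySem.Set String)) (group : List String) (used : PySem.Set Int)
    (h : size ≤ (group.length : Int)) :
    pvInnerA size tokens T group used = (group, used) := by
  induction T with
  | nil => simp [pvInnerA]
  | cons p rest ih =>
    obtain ⟨j, okw, otoks⟩ := p
    rw [pvInnerA]
    by_cases hc : PySem.Set.contains used j = true
    · rw [if_pos hc]; exact ih
    · rw [if_neg hc, if_pos h]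


theorem pvInnerB_full (size : Int) (keywords : List String)
    (C : List Int) (group : List String) (used : PySem.Set Int)
    (h : size ≤ (group.length : Int)) :
    pvInnerB size keywords C group used = (group, used) := by
  cases C with
  | nil => simp [pvInnerB]
  | cons j rest => simp only [pvInnerB]; rw [if_pos h]


theorem pvInner_eq (size : Int) (keywords : List String) (a : String)
    (T : List (Int × String × PySem.Set String))
    (hT : ∀ p ∈ T, p.2.1 = PySem.List.pyGetD keywords p.1 "" ∧
      p.2.2 = pvTokSet (PySem.List.pyGetD keywords p.1 "")) :
    ∀ (group : List String) (used : PySem.Set Int),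
      pvInnerA size (pvTokSet a) T group used =
        pvInnerB size keywords
          ((T.map (·.1)).filter (fun j => pvSh a (PySem.List.pyGetD keywords j ""))) group used := by
  induction T with
  | nil => intro group used; simp [pvInnerA, pvInnerB]
  | cons p rest ih =>
    obtain ⟨j, okw, otoks⟩ := p
    obtain ⟨h1, h2⟩ := hT _ List.mem_cons_self
    simp only at h1 h2
    have hrest := fun q hq => hT q (List.mem_cons_of_mem _ hq)
    intro group used
    by_cases hfull : size ≤ (group.length : Int)
    · rw [pvInnerA_full _ _ _ _ _ hfull, pvInnerB_full _ _ _ _ _ hfull]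
    · rw [List.map_cons, List.filter_cons]
      by_cases hsh : pvSh a (PySem.List.pyGetD keywords j "") = true
      · rw [if_pos (by simpa using hsh)]
        by_cases hu : PySem.Set.contains used j = true
        · rw [pvInnerA, if_pos hu, pvInnerB, if_neg hfull, if_pos hu]
          exact ih hrest group used
        · have hshp : pvMeaningfulShared (pvTokSet a) otoks ≠ [] := by
            rw [h2]; exact (pvShareA_iff a (PySem.List.pyGetD keywords j "")).mpr hsh
          rw [pvInnerA, if_neg hu, if_neg hfull, if_pos hshp, h1,
            pvInnerB, if_neg hfull, if_neg hu]
          exact ih hrest _ _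
      · rw [if_neg (by simpa using hsh)]
        by_cases hu : PySem.Set.contains used j = true
        · rw [pvInnerA, if_pos hu]
          exact ih hrest group used
        · have hshp : ¬ pvMeaningfulShared (pvTokSet a) otoks ≠ [] := by
            rw [h2]
            exact fun hc => hsh ((pvShareA_iff a (PySem.List.pyGetD keywords j "")).mp hc)
          rw [pvInnerA, if_neg hu, if_neg hfull, if_neg hshp]
          exact ih hrest group used

theorem pvInnerA_used_mono (size : Int) (tokens : PySem.Set String)
    (T : List (Int × String × PySem.Set String)) (group : List String) (used : PySem.Set Int)
    (x : Int) (h : PySem.Set.contains used x = true) :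
    PySem.Set.contains (pvInnerA size tokens T group used).2 x = true := by
  induction T generalizing group used with
  | nil => simpa [pvInnerA] using h
  | cons p rest ih =>
    obtain ⟨j, okw, otoks⟩ := p
    simp only [pvInnerA]
    split
    · exact ih _ _ h
    · split
      · simpa using h
      · split
        · exact ih _ _ (by simp [PySem.Set.mem_add] at h ⊢; exact Or.inl h)
        · exact ih _ _ h


theorem pvStepA_mono (size : Int) (kwt : List (String × PySem.Set String))
    (st : PySem.Set Int × List (List String)) (p : Int × String × PySem.Set String)
    (x : Int) (h : PySem.Set.contains st.1 x = true) :
    PySem.Set.contains (pvOuterStepA size kwt st p).1 x = true := by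
  unfold pvOuterStepA
  split
  · exact h
  · exact pvInnerA_used_mono _ _ _ _ _ _
      (by simp [PySem.Set.mem_add] at h ⊢; exact Or.inl h)


theorem pvFoldA_mono (size : Int) (kwt : List (String × PySem.Set String))
    (L : List (Int × String × PySem.Set String)) (st : PySem.Set Int × List (List String))
    (x : Int) (h : PySem.Set.contains st.1 x = true) :
    PySem.Set.contains (L.foldl (pvOuterStepA size kwt) st).1 x = true := by
  induction L generalizing st with
  | nil => simpa using h
  | cons p rest ih => exact ih _ (pvStepA_mono _ _ _ _ _ h)


theorem pvFoldA_all_used (size : Int) (kwt : List (String × PySem.Set String))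
    (L : List (Int × String × PySem.Set String)) (st : PySem.Set Int × List (List String)) :
    ∀ p ∈ L, PySem.Set.contains (L.foldl (pvOuterStepA size kwt) st).1 p.1 = true := by
  induction L generalizing st with
  | nil => intro p hp; simp at hp
  | cons q rest ih =>
    intro p hp
    rw [List.foldl_cons]
    rcases List.mem_cons.mp hp with rfl | hmem
    · refine pvFoldA_mono _ _ _ _ _ ?_
      simp only [pvOuterStepA]
      split
      · assumption
      · exact pvInnerA_used_mono _ _ _ _ _ _
          (by simp [PySem.Set.mem_add])
    · exact ih _ p hmem


theorem pvFold_eq (keywords : List String) (size : Int) :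
    (PySem.List.enumerate (keywords.map (fun kw => (kw, pvTokSet kw)))).foldl
        (pvOuterStepA size (keywords.map (fun kw => (kw, pvTokSet kw)))) (PySem.Set.empty, [])
      = (PySem.List.pyRange 0 (PySem.List.len keywords) 1).foldl
          (pvOuterStepB size keywords (keywords.map pvToks)
            (pvIndexB (keywords.map pvToks))) (PySem.Set.empty, []) := by
  rw [PySem.List.enumerate_eq_map_pyRange (keywords.map (fun kw => (kw, pvTokSet kw)))
    ("", pvTokSet ""), List.foldl_map]
  have hlen : PySem.List.len (keywords.map (fun kw => (kw, pvTokSet kw)))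
      = PySem.List.len keywords := by simp [PySem.List.len_eq]
  rw [hlen]
  apply PySem.List.foldl_congr_mem
  intro st i hi
  obtain ⟨h0, hn⟩ := PySem.List.mem_pyRange_one.mp hi
  rw [PySem.List.len_eq] at hn
  have hd : PySem.List.pyGetD (keywords.map (fun kw => (kw, pvTokSet kw))) i ("", pvTokSet "")
      = (keywords[i.toNat]'(by omega), pvTokSet (keywords[i.toNat]'(by omega))) := by
    rw [PySem.List.pyGetD_eq_getElem _ _ h0 (by simpa using hn), List.getElem_map]
  have hgi : PySem.List.pyGetD keywords i "" = keywords[i.toNat]'(by omega) := by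
    rw [PySem.List.pyGetD_eq_getElem _ _ h0 hn]
  simp only [pvOuterStepA, pvOuterStepB, hd]
  by_cases hc : PySem.Set.contains st.1 i = true
  · rw [if_pos hc, if_pos hc]
  · rw [if_neg hc, if_neg hc]
    have hT : ∀ p ∈ PySem.List.enumerate (keywords.map (fun kw => (kw, pvTokSet kw))),
        p.2.1 = PySem.List.pyGetD keywords p.1 "" ∧
        p.2.2 = pvTokSet (PySem.List.pyGetD keywords p.1 "") := by
      intro p hp
      rw [PySem.List.mem_enumerate_iff] at hp
      obtain ⟨k, hk, rfl⟩ := hp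
      simp only [List.getElem_map, zero_add]
      rw [PySem.List.pyGetD_natCast, List.getD_eq_getElem _ _ (by simpa using hk)]
      exact ⟨rfl, rfl⟩
    rw [pvInner_eq size keywords (keywords[i.toNat]'(by omega)) _ hT]
    have hmf : ((PySem.List.enumerate (keywords.map (fun kw => (kw, pvTokSet kw)))).map (·.1))
        = PySem.List.pyRange 0 (PySem.List.len keywords) 1 := by
      rw [PySem.List.map_fst_enumerate]
      simp [PySem.List.len_eq]
    rw [hmf, ← hgi, ← pvCand_eq keywords i hi]

-- ===== VERDICT (by name: the statement is the Claim_ definition above) =====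
theorem smart_group_keywords_py_spec : Claim_equal_smart_group_keywords_py := by
  intro keywords size _
  unfold Spec_smart_group_keywords_py smart_group_keywords_py smart_group_keywords_py_alt
  by_cases hle : PySem.List.len keywords ≤ size
  · rw [if_pos hle, if_pos hle]
  · rw [if_neg hle, if_neg hle]
    simp only
    rw [pvFold_eq keywords size]
    have hrem : ((PySem.List.enumerate (keywords.map (fun kw => (kw, pvTokSet kw)))).filter
        (fun p => ! PySem.Set.contains
          ((PySem.List.pyRange 0 (PySem.List.len keywords) 1).foldl
            (pvOuterStepB size keywords (keywords.map pvToks)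
              (pvIndexB (keywords.map pvToks))) (PySem.Set.empty, [])).1 p.1)) = [] := by
      rw [List.filter_eq_nil_iff]
      intro p hp
      rw [← pvFold_eq keywords size]
      have hall := pvFoldA_all_used size (keywords.map (fun kw => (kw, pvTokSet kw)))
        (PySem.List.enumerate (keywords.map (fun kw => (kw, pvTokSet kw))))
        (PySem.Set.empty, []) p hp
      have hmem := (PySem.Set.contains_iff _ _).mp hall
      simpa using hmem
    rw [hrem]
    simp
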